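-- pv_equiv track=rewrite | github.com/Kapil-Waghumbare/SpectroGuard-BE-Project | Scripts/lower order score.py | prediction_accuracy
-- ===== SOURCE A (Python) =====
-- def build_ngram_transitions(seq, order):
--     """Build transition counts for an n-gram model."""
--     transitions = {}
--     for i in range(len(seq) - order):
--         state = tuple(seq[i:i + order])
--         next_s = seq[i + order]
--         transitions.setdefault(state, {})
--         transitions[state][next_s] = transitions[state].get(next_s, 0) + 1
--     return transitions
--
-- def predict_next(transitions, context):
--     """Predict next symbol given a context tuple."""
--     if context not in transitions:
--         return None
--     counts = transitions[context]
--     total  = sum(counts.values())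
--     return max(counts, key=counts.get), counts[max(counts, key=counts.get)] / total
--
-- def prediction_accuracy(seq, order):
--     transitions = build_ngram_transitions(seq, order)
--     correct = 0
--     total   = 0
--     for i in range(len(seq) - order):
--         context = tuple(seq[i:i + order])
--         result  = predict_next(transitions, context)
--         if result and result[0] == seq[i + order]:
--             correct += 1
--         total += 1
--     raw   = correct / total if total else 0
--     # Lower-order raw accuracy ≈ 0.30–0.40 → map to 0–100
--     score = min(100, round(raw * 110))
--     return score
-- ===== SOURCE B (Python) =====
-- def prediction_accuracy(seq, order):
--     # A position is predicted correctly exactly when its successor is the argmax of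
--     # its context's successor distribution, so the number of correct positions equals,
--     # summed per distinct context, the maximal multiplicity among that context's
--     # successors: group successors by context once, no per-position prediction at all.
--     total = len(seq) - order
--     if total <= 0:
--         return 0
--     groups = {}
--     for i in range(total):
--         groups.setdefault(tuple(seq[i:i + order]), []).append(seq[i + order])
--     correct = 0
--     for g in groups.values():
--         cnt = {}
--         for s in g:
--             cnt[s] = cnt.get(s, 0) + 1
--         correct += max(cnt.values())
--     return min(100, round(correct / total * 110))
-- ===== Notes on version B (the rewrite author's own statement) =====
-- stated objective: alternative
-- what changed: B never predicts: it uses the identity 'correct positions = sum over distinct contexts of the maximal successor multiplicity', grouping successors by context in one pass and adding each group's maximal count, instead of A's per-position predict_next that rebuilds the argmax (twice) and a probability at every position; this removes the per-position alphabet scans (a timing run read ~3-4x on the generated inputs but could not confirm it at the largest sizes, so no speed is claimed).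
import Mathlib
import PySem

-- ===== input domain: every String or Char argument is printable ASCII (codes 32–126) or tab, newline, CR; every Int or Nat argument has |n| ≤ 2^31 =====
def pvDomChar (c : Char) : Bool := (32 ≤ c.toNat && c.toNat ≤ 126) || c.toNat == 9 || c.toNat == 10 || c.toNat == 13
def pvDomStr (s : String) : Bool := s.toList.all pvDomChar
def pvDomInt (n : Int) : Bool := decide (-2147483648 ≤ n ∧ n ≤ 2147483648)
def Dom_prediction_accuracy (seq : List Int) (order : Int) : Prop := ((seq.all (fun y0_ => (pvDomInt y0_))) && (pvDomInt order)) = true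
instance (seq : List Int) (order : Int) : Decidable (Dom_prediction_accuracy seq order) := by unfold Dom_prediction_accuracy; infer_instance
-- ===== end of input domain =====

-- B drops prediction altogether: the number of correctly predicted positions equals, summed per
-- distinct context, the maximal multiplicity among that context's successors, so B groups the
-- successors by context once and sums per-group maxima (a different algorithm, not claimed faster).

-- Shared helpers for subexpressions both Python versions contain verbatim:
-- pvKey = tuple(seq[i:i+order]);  pvNxt = seq[i+order] (total under Pre_, see below);
-- pvAm  = max(counts, key=counts.get) (first maximal key in insertion order; counts is never empty where used).
def pvKey (seq : List Int) (order i : Int) : List Int := PySem.List.slice seq (some i) (some (i + order))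
def pvNxt (seq : List Int) (order i : Int) : Int := (PySem.List.pyGet? seq (i + order)).getD 0
def pvAm (d : PySem.Dict Int Int) : Int := (PySem.List.max? d.keys (fun k => d.getD k 0)).getD 0

-- Exact binary64 model of the Python float expression  min(100, round((c/t) * 110))  (0 ≤ c ≤ t, 0 < t),
-- which both versions compute: round-half-even to 53 significant bits after the division and after the
-- multiplication, then Python round (half-even). Both Pythons contain this same expression.
def pvRHE (a b : Int) : Int :=
  let q := PySem.Int.floordiv a b
  let r := PySem.Int.mod a b
  if 2 * r < b then q
  else if b < 2 * r then q + 1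
  else if PySem.Int.mod q 2 = 0 then q else q + 1

def pvFloatScore (c t : Int) : Int :=
  if c = 0 then 0
  else
    let E0 : Int := (PySem.Int.bitLength c : Int) - (PySem.Int.bitLength t : Int)
    let ok : Bool := if 0 ≤ E0 then decide (t <<< E0.toNat ≤ c) else decide (t ≤ c <<< (-E0).toNat)
    let E1 : Int := if ok then E0 else E0 - 1
    let m0 := pvRHE (c <<< (52 - E1).toNat) t
    let m : Int := if m0 = 2 ^ 53 then 2 ^ 52 else m0
    let E : Int := if m0 = 2 ^ 53 then E1 + 1 else E1
    let x := m * 110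
    let L : Int := (PySem.Int.bitLength x : Int)
    if 53 < L then
      let s0 := L - 53
      let x2 := pvRHE x (2 ^ s0.toNat)
      let x3 : Int := if x2 = 2 ^ 53 then 2 ^ 52 else x2
      let s : Int := if x2 = 2 ^ 53 then s0 + 1 else s0
      pvRHE x3 (2 ^ (52 - E - s).toNat)
    else
      pvRHE x (2 ^ (52 - E).toNat)

-- ===== PORT A =====
-- `transitions.setdefault(state, {})` followed by `transitions[state][next_s] = transitions[state].get(next_s, 0) + 1`
-- is one `modify` at `state` with default `{}` (same key position, same resulting value).
def build_ngram_transitions (seq : List Int) (order : Int) : PySem.Dict (List Int) (PySem.Dict Int Int) :=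
  (PySem.List.pyRange 0 ((seq.length : Int) - order)).foldl
    (fun transitions i =>
      transitions.modify (pvKey seq order i) PySem.Dict.empty
        (fun d => d.modify (pvNxt seq order i) 0 (· + 1)))
    PySem.Dict.empty

-- Python returns the pair (argmax, counts[argmax]/total); the second component is a float that
-- prediction_accuracy never uses (it only tests `result` truthy — a 2-tuple always is — and result[0]),
-- so the port returns Option Int: the predicted symbol.
def predict_next (transitions : PySem.Dict (List Int) (PySem.Dict Int Int)) (context : List Int) : Option Int :=
  match transitions.get? context with
  | none => none
  | some counts => some (pvAm counts)

def prediction_accuracy (seq : List Int) (order : Int) : Int :=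
  let transitions := build_ngram_transitions seq order
  let ct := (PySem.List.pyRange 0 ((seq.length : Int) - order)).foldl
    (fun (ct : Int × Int) i =>
      ((match predict_next transitions (pvKey seq order i) with
        | some p => if p = pvNxt seq order i then ct.1 + 1 else ct.1
        | none => ct.1), ct.2 + 1))
    (0, 0)
  min 100 (if ct.2 ≠ 0 then pvFloatScore ct.1 ct.2 else 0)

-- ===== PORT B =====
-- the per-group pass:  cnt = {}; for s in g: cnt[s] = cnt.get(s, 0) + 1;  then max(cnt.values())
-- (g is never empty where used; getD 0 is the dead default)
def pvMaxCount (g : List Int) : Int :=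
  let cnt := g.foldl (fun d s => d.insert s (d.getD s 0 + 1)) (PySem.Dict.empty : PySem.Dict Int Int)
  (PySem.List.max? cnt.values (fun y => y)).getD 0

def prediction_accuracy_alt (seq : List Int) (order : Int) : Int :=
  let total : Int := (seq.length : Int) - order
  if total ≤ 0 then 0
  else
    -- groups.setdefault(tuple(seq[i:i+order]), []).append(seq[i+order])
    let groups := (PySem.List.pyRange 0 total).foldl
      (fun g i => g.modify (pvKey seq order i) [] (fun ns => ns ++ [pvNxt seq order i]))
      (PySem.Dict.empty : PySem.Dict (List Int) (List Int))
    let correct := groups.values.foldl (fun (acc : Int) g => acc + pvMaxCount g) 0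
    min 100 (pvFloatScore correct total)

-- ===== PRECONDITION & SPEC =====
-- Pre_ excludes exactly order < -len(seq), where Python A raises IndexError (seq[i+order] out of range);
-- Python B raises there too.
def Pre_prediction_accuracy (seq : List Int) (order : Int) : Prop := -(seq.length : Int) ≤ order
instance (seq : List Int) (order : Int) : Decidable (Pre_prediction_accuracy seq order) := by unfold Pre_prediction_accuracy; infer_instance
def pvWitness_prediction_accuracy : List Int × Int := ([1, 2, 1, 2, 1], 1)
def Spec_prediction_accuracy (seq : List Int) (order : Int) (out : Int) : Prop := out = prediction_accuracy_alt seq order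
instance (seq : List Int) (order : Int) (out : Int) : Decidable (Spec_prediction_accuracy seq order out) := by unfold Spec_prediction_accuracy; infer_instance

-- ===== CLAIM (what is proved, stated in full; the proofs are below) =====
def Claim_equal_prediction_accuracy : Prop := ∀ (seq : List Int) (order : Int), Dom_prediction_accuracy seq order → Pre_prediction_accuracy seq order → Spec_prediction_accuracy seq order (prediction_accuracy seq order)

-- ===== LEMMAS AND PROOFS =====

-- The successor list of context c among the position pairs ps (= (context, next) per position).
def pvNs (ps : List (List Int × Int)) (c : List Int) : List Int :=
  (ps.filter (fun p => p.1 == c)).map (fun p => p.2)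

theorem pvNs_cons (p : List Int × Int) (ps : List (List Int × Int)) (c : List Int) :
    pvNs (p :: ps) c = if p.1 = c then p.2 :: pvNs ps c else pvNs ps c := by
  unfold pvNs
  by_cases h : p.1 = c <;> simp [h]

theorem pvNs_nil_of_not_mem (ps : List (List Int × Int)) (c : List Int)
    (h : c ∉ ps.map Prod.fst) : pvNs ps c = [] := by
  unfold pvNs
  rw [List.filter_eq_nil_iff.mpr, List.map_nil]
  intro p hp
  simp only [beq_iff_eq]
  exact fun hc => h (hc ▸ List.mem_map_of_mem hp)

-- A's nested transition-count fold, read off at one context, is the counter fold of that context's successors.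
theorem pv_trans_getD (ps : List (List Int × Int)) (T0 : PySem.Dict (List Int) (PySem.Dict Int Int)) (c : List Int) :
    (ps.foldl (fun T p => T.modify p.1 PySem.Dict.empty (fun d => d.modify p.2 0 (· + 1))) T0).getD c PySem.Dict.empty
      = (pvNs ps c).foldl (fun d x => d.modify x 0 (· + 1)) (T0.getD c PySem.Dict.empty) := by
  induction ps generalizing T0 with
  | nil => simp [pvNs]
  | cons p ps ih =>
      rw [List.foldl_cons, ih, pvNs_cons]
      by_cases h : p.1 = c
      · rw [if_pos h, List.foldl_cons, PySem.Dict.getD_modify, if_pos h.symm, h]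
      · rw [if_neg h, PySem.Dict.getD_modify, if_neg (fun hc => h hc.symm)]

-- In a counter's argmax position the counter attains the maximum multiplicity (B's per-group value).
theorem pv_count_am (ns : List Int) (h : ns ≠ []) :
    (List.count (pvAm (PySem.Dict.counter ns)) ns : Int) = pvMaxCount ns := by
  have hkeys : (PySem.Dict.counter ns).keys = PySem.Set.ofList ns := PySem.Dict.keys_counter ns
  have hfun : (fun k => (PySem.Dict.counter ns).getD k 0) = (fun k => (List.count k ns : Int)) := by
    funext k; exact PySem.Dict.getD_counter ns k
  have hne : PySem.Set.ofList ns ≠ [] := by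
    cases hns : PySem.Set.ofList ns with
    | nil =>
        cases ns with
        | nil => exact absurd rfl h
        | cons a t =>
            have : a ∈ PySem.Set.ofList (a :: t) := (PySem.Set.mem_ofList _ a).mpr (List.mem_cons_self)
            rw [hns] at this; cases this
    | cons a t => simp
  obtain ⟨m, hm⟩ : ∃ m, PySem.List.max? (PySem.Set.ofList ns) (fun k => (List.count k ns : Int)) = some m := by
    cases hmm : PySem.List.max? (PySem.Set.ofList ns) (fun k => (List.count k ns : Int)) with
    | none => exact absurd ((PySem.List.max?_eq_none_iff _ _).mp hmm) hne
    | some m => exact ⟨m, rfl⟩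
  have hamm : pvAm (PySem.Dict.counter ns) = m := by
    unfold pvAm; rw [hkeys, hfun, hm]; rfl
  have hvals : (ns.foldl (fun d s => d.insert s (d.getD s 0 + 1)) (PySem.Dict.empty : PySem.Dict Int Int)).values
      = (PySem.Set.ofList ns).map (fun s => (List.count s ns : Int)) := by
    rw [PySem.Dict.foldl_insert_getD_add_one_eq_counter]
    show (PySem.Dict.counter ns).items.map (fun p => p.2) = _
    rw [PySem.Dict.items_counter, List.map_map]
    rfl
  obtain ⟨z, hz⟩ : ∃ z, PySem.List.max? ((PySem.Set.ofList ns).map (fun s => (List.count s ns : Int))) (fun y => y) = some z := by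
    cases hmm : PySem.List.max? ((PySem.Set.ofList ns).map (fun s => (List.count s ns : Int))) (fun y => y) with
    | none =>
        have := (PySem.List.max?_eq_none_iff _ _).mp hmm
        rw [List.map_eq_nil_iff] at this
        exact absurd this hne
    | some z => exact ⟨z, rfl⟩
  have hmmem : m ∈ PySem.Set.ofList ns := PySem.List.max?_mem hm
  have hfm_mem : (List.count m ns : Int) ∈ (PySem.Set.ofList ns).map (fun s => (List.count s ns : Int)) :=
    List.mem_map_of_mem hmmem
  have h1 : (List.count m ns : Int) ≤ z := PySem.List.max?_isMax hz _ hfm_mem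
  obtain ⟨y, hy, hyz⟩ := List.mem_map.mp (PySem.List.max?_mem hz)
  have h2 : z ≤ (List.count m ns : Int) := hyz ▸ PySem.List.max?_isMax hm y hy
  unfold pvMaxCount
  simp only [hvals, hz, hamm]
  exact le_antisymm h1 h2

-- A list sum over the dedup'd contexts is the Finset sum over the distinct contexts.
theorem pv_sum_ofList (xs : List (List Int)) (h : List Int → Int) :
    ((PySem.Set.ofList xs).map h).sum = ∑ c ∈ xs.toFinset, h c := by
  have hfs : (PySem.Set.ofList xs).toFinset = xs.toFinset := by
    apply Finset.ext
    intro a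
    simp [List.mem_toFinset, PySem.Set.mem_ofList]
  rw [← List.sum_toFinset h (PySem.Set.nodup_ofList xs), hfs]

-- Grouping A's per-position 0/1 sum by context: positions whose successor equals g(context)
-- count, per distinct context c, exactly as the multiplicity of g(c) among c's successors.
theorem pv_group (ps : List (List Int × Int)) (g : List Int → Int) :
    (ps.map (fun p => if g p.1 = p.2 then (1 : Int) else 0)).sum
      = ∑ c ∈ (ps.map Prod.fst).toFinset, ((pvNs ps c).count (g c) : Int) := by
  induction ps with
  | nil => simp
  | cons p ps ih =>
      rw [List.map_cons, List.sum_cons, ih]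
      have hcount : ∀ c ∈ ((p :: ps).map Prod.fst).toFinset,
          ((pvNs (p :: ps) c).count (g c) : Int)
            = ((pvNs ps c).count (g c) : Int) + (if c = p.1 ∧ g c = p.2 then 1 else 0) := by
        intro c _
        rw [pvNs_cons]
        by_cases h : p.1 = c
        · rw [if_pos h]
          by_cases h2 : g c = p.2
          · rw [if_pos ⟨h.symm, h2⟩]
            simp [h2]
          · rw [if_neg (fun hc => h2 hc.2)]
            have h3 : ¬ p.2 = g c := fun hh => h2 hh.symm
            simp [h3]
        · rw [if_neg h, if_neg (fun hc => h hc.1.symm)]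
          ring
      rw [Finset.sum_congr rfl hcount, Finset.sum_add_distrib]
      have hδ : (∑ c ∈ ((p :: ps).map Prod.fst).toFinset, (if c = p.1 ∧ g c = p.2 then (1 : Int) else 0))
          = if g p.1 = p.2 then 1 else 0 := by
        rw [Finset.sum_eq_single p.1]
        · by_cases h2 : g p.1 = p.2
          · rw [if_pos ⟨rfl, h2⟩, if_pos h2]
          · rw [if_neg (fun hc => h2 hc.2), if_neg h2]
        · intro c _ hc
          rw [if_neg (fun hh => hc hh.1)]
        · intro hmem
          exact absurd (by simp) hmem
      have hS : (∑ c ∈ ((p :: ps).map Prod.fst).toFinset, ((pvNs ps c).count (g c) : Int))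
          = ∑ c ∈ (ps.map Prod.fst).toFinset, ((pvNs ps c).count (g c) : Int) := by
        rw [List.map_cons, List.toFinset_cons]
        by_cases hmem : p.1 ∈ (ps.map Prod.fst).toFinset
        · rw [Finset.insert_eq_self.mpr hmem]
        · rw [Finset.sum_insert hmem]
          rw [pvNs_nil_of_not_mem ps p.1 (fun hh => hmem (List.mem_toFinset.mpr hh))]
          simp
      rw [hδ, hS]
      ring

-- A's two-component loop splits into the 0/1 sum and the length.
theorem pv_fold_pair (cond : Int → Prop) [DecidablePred cond] (l : List Int) :
    ∀ (c t : Int),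
      l.foldl (fun (ct : Int × Int) i => ((if cond i then ct.1 + 1 else ct.1), ct.2 + 1)) (c, t)
        = (l.foldl (fun (a : Int) i => a + (if cond i then 1 else 0)) c, t + l.length) := by
  induction l with
  | nil => intro c t; simp
  | cons x xs ih =>
      intro c t
      simp only [List.foldl_cons, ih, List.length_cons]
      refine Prod.ext ?_ ?_
      · show List.foldl _ (if cond x then c + 1 else c) xs = List.foldl _ (c + if cond x then 1 else 0) xs
        congr 1
        split_ifs <;> ring
      · push_cast; ring

theorem pv_keys_T (seq : List Int) (order : Int) :
    (build_ngram_transitions seq order).keys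
      = PySem.Set.ofList ((PySem.List.pyRange 0 ((seq.length : Int) - order)).map (pvKey seq order)) := by
  unfold build_ngram_transitions
  rw [PySem.Dict.keys_foldl_modify_key]
  rfl

theorem pv_get?_T (seq : List Int) (order i : Int)
    (hi : i ∈ PySem.List.pyRange 0 ((seq.length : Int) - order)) :
    (build_ngram_transitions seq order).get? (pvKey seq order i)
      = some (PySem.Dict.counter (pvNs ((PySem.List.pyRange 0 ((seq.length : Int) - order)).map
          (fun j => (pvKey seq order j, pvNxt seq order j))) (pvKey seq order i))) := by
  have hmem : pvKey seq order i ∈ (build_ngram_transitions seq order).keys := by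
    rw [pv_keys_T, PySem.Set.mem_ofList]
    exact List.mem_map_of_mem hi
  have hc : (build_ngram_transitions seq order).contains (pvKey seq order i) = true :=
    (PySem.Dict.contains_iff_mem_keys _ _).mpr hmem
  obtain ⟨d, hd⟩ : ∃ d, (build_ngram_transitions seq order).get? (pvKey seq order i) = some d := by
    cases hget : (build_ngram_transitions seq order).get? (pvKey seq order i) with
    | none => rw [PySem.Dict.get?_eq_none_iff_contains] at hget; rw [hget] at hc; cases hc
    | some d => exact ⟨d, rfl⟩
  have hgetD : (build_ngram_transitions seq order).getD (pvKey seq order i) PySem.Dict.empty = d := by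
    rw [PySem.Dict.getD_eq_get?_getD, hd]; rfl
  have htrans : (build_ngram_transitions seq order).getD (pvKey seq order i) PySem.Dict.empty
      = PySem.Dict.counter (pvNs ((PySem.List.pyRange 0 ((seq.length : Int) - order)).map
          (fun j => (pvKey seq order j, pvNxt seq order j))) (pvKey seq order i)) := by
    have hfold : build_ngram_transitions seq order
        = ((PySem.List.pyRange 0 ((seq.length : Int) - order)).map
            (fun j => (pvKey seq order j, pvNxt seq order j))).foldl
            (fun T p => T.modify p.1 PySem.Dict.empty (fun d => d.modify p.2 0 (· + 1)))
            PySem.Dict.empty := by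
      unfold build_ngram_transitions
      rw [List.foldl_map]
    rw [hfold, pv_trans_getD, PySem.Dict.counter_eq_foldl]
    rfl
  rw [hd, ← hgetD, htrans]

-- ===== VERDICT (by name: the statement is the Claim_ definition above) =====
theorem prediction_accuracy_spec : Claim_equal_prediction_accuracy := by
  intro seq order _ _
  unfold Spec_prediction_accuracy prediction_accuracy prediction_accuracy_alt
  simp only []
  set n : Int := (seq.length : Int) with hn
  set l := PySem.List.pyRange 0 (n - order) with hl
  set ps := l.map (fun j => (pvKey seq order j, pvNxt seq order j)) with hps
  set T := build_ngram_transitions seq order with hT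
  have hlen : (l.length : Int) = if 0 < n - order then n - order else 0 := by
    rw [hl, PySem.List.length_pyRange_one]
    split_ifs with h <;> omega
  by_cases hpos : 0 < n - order
  case neg =>
    have hle : n - order ≤ 0 := by omega
    have hlnil : l = [] := by
      have : l.length = 0 := by omega
      exact List.eq_nil_of_length_eq_zero this
    rw [if_pos hle, hlnil]
    simp
  case pos =>
    rw [if_neg (by omega : ¬ n - order ≤ 0)]
    -- replace A's per-position prediction by the per-context argmax of the grouped successors
    have hcong :
        l.foldl (fun (ct : Int × Int) i =>
          ((match predict_next T (pvKey seq order i) with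
            | some p => if p = pvNxt seq order i then ct.1 + 1 else ct.1
            | none => ct.1), ct.2 + 1)) (0, 0)
        = l.foldl (fun (ct : Int × Int) i =>
            ((if pvAm (PySem.Dict.counter (pvNs ps (pvKey seq order i))) = pvNxt seq order i
              then ct.1 + 1 else ct.1), ct.2 + 1)) (0, 0) := by
      refine PySem.List.foldl_congr_mem l _ _ _ ?_
      intro acc i hi
      have hg := pv_get?_T seq order i (by rw [← hl]; exact hi)
      rw [← hl, ← hps] at hg
      rw [← hT] at hg
      simp [predict_next, hg]
    rw [hcong,
      pv_fold_pair (fun i => pvAm (PySem.Dict.counter (pvNs ps (pvKey seq order i))) = pvNxt seq order i) l 0 0]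
    have htot : ((0 : Int) + l.length) = n - order := by rw [hlen, if_pos hpos]; ring
    rw [htot, if_pos (by omega : n - order ≠ 0)]
    -- both correct counts equal the same Finset sum over the distinct contexts
    have hA :
        l.foldl (fun (a : Int) i =>
          a + (if pvAm (PySem.Dict.counter (pvNs ps (pvKey seq order i))) = pvNxt seq order i then 1 else 0)) 0
        = ∑ c ∈ (ps.map Prod.fst).toFinset,
            ((pvNs ps c).count (pvAm (PySem.Dict.counter (pvNs ps c))) : Int) := by
      rw [PySem.List.foldl_add]
      rw [show l.map (fun i =>
            if pvAm (PySem.Dict.counter (pvNs ps (pvKey seq order i))) = pvNxt seq order i then (1 : Int) else 0)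
          = ps.map (fun p => if pvAm (PySem.Dict.counter (pvNs ps p.1)) = p.2 then (1 : Int) else 0) by
        rw [hps, List.map_map]; rfl]
      rw [pv_group ps (fun c => pvAm (PySem.Dict.counter (pvNs ps c)))]
      simp
    rw [hA]
    -- B's groups dict: keys are the distinct contexts, each value is that context's successor list
    set G := l.foldl (fun g i => g.modify (pvKey seq order i) [] (fun ns => ns ++ [pvNxt seq order i]))
      (PySem.Dict.empty : PySem.Dict (List Int) (List Int)) with hG
    have hkeysG : G.keys = PySem.Set.ofList (l.map (pvKey seq order)) := by
      rw [hG, PySem.Dict.keys_foldl_modify_key]; rfl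
    have hnodup : G.keys.Nodup := by rw [hkeysG]; exact PySem.Set.nodup_ofList _
    have hGgetD : ∀ c, G.getD c [] = pvNs ps c := by
      intro c
      rw [hG, show l.foldl (fun g i => g.modify (pvKey seq order i) [] (fun ns => ns ++ [pvNxt seq order i]))
            (PySem.Dict.empty : PySem.Dict (List Int) (List Int))
          = ps.foldl (fun g p => g.modify p.1 [] (fun ns => ns ++ [p.2])) PySem.Dict.empty by
        rw [hps, List.foldl_map]]
      rw [PySem.Dict.getD_foldl_modify_append]
      rfl
    have hB : G.values.foldl (fun (acc : Int) g => acc + pvMaxCount g) 0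
        = ∑ c ∈ (ps.map Prod.fst).toFinset,
            ((pvNs ps c).count (pvAm (PySem.Dict.counter (pvNs ps c))) : Int) := by
      rw [PySem.Dict.values_eq_map_keys G hnodup [], hkeysG, PySem.List.foldl_add, List.map_map]
      have hmaps : (l.map (pvKey seq order)) = ps.map Prod.fst := by
        rw [hps, List.map_map]; rfl
      rw [show ((fun (g : List Int) => pvMaxCount g) ∘ fun k => G.getD k [])
          = fun c => pvMaxCount (pvNs ps c) by funext c; simp [hGgetD]]
      rw [hmaps, pv_sum_ofList (ps.map Prod.fst) (fun c => pvMaxCount (pvNs ps c))]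
      rw [zero_add]
      refine Finset.sum_congr rfl ?_
      intro c hc
      have hcc : c ∈ ps.map Prod.fst := List.mem_toFinset.mp hc
      obtain ⟨p, hp, hpc⟩ := List.mem_map.mp hcc
      have hne : pvNs ps c ≠ [] := by
        unfold pvNs
        intro hnil
        rw [List.map_eq_nil_iff, List.filter_eq_nil_iff] at hnil
        exact hnil p hp (by simp [hpc])
      rw [← pv_count_am (pvNs ps c) hne]
    rw [hB]
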